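-- pv_equiv track=rewrite | github.com/andrespalma02/AdventOfCode | Varios/Trash/Tarea_M5.py | calcular_postes
-- ===== SOURCE A (Python) =====
-- def calcular_postes(cerca):
--     postes = 0
--     i = 0
--     while i < len(cerca["array_postes"]) - 1:
--         if cerca["array_postes"][i] == 0 and cerca["array_postes"][i + 1] == 0:
--             postes += 1
--             i += 2
--         else:
--             i += 1
--     return postes
-- ===== SOURCE B (Python) =====
-- def calcular_postes(cerca):
--     total = 0
--     run = 0
--     for x in cerca["array_postes"]:
--         if x == 0:
--             run += 1
--         else:
--             total += run // 2
--             run = 0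
--     return total + run // 2
-- ===== Notes on version B (the rewrite author's own statement) =====
-- stated objective: simpler
-- what changed: Replaced the greedy index-skipping while-loop (advance by 2 after a matched zero pair) with a single for-loop that tallies the length of each maximal zero run and adds run // 2 per run.
import Mathlib
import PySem

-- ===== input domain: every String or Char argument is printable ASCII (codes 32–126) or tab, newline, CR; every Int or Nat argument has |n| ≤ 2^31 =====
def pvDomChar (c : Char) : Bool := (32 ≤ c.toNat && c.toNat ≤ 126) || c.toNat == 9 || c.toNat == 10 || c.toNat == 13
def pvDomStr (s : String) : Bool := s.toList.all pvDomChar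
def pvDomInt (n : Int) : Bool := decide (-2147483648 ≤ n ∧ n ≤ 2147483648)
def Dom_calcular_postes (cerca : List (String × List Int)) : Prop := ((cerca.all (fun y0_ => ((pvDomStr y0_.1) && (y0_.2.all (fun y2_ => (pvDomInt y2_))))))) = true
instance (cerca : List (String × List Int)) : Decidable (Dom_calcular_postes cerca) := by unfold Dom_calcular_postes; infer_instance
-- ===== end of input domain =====

-- B replaces A's greedy index-skipping two-pointer scan by a run-length tally (run // 2 per
-- maximal zero run); objective: simpler.

-- shared dict lookup: cerca["array_postes"], first match (KeyError = none, excluded by Pre_)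
def lookupPostes : List (String × List Int) → Option (List Int)
  | [] => none
  | (k, v) :: t => if k = "array_postes" then some v else lookupPostes t

-- ===== PORT A =====
-- while i < len(arr) - 1 (i : Nat, so the Python Int condition i < len-1 is i+1 < len);
-- arr[i]! is exact here since both indices are in range whenever read.
def loopA (arr : List Int) (i : Nat) (postes : Int) : Int :=
  if _h : i + 1 < arr.length then
    if arr[i]! = 0 ∧ arr[i+1]! = 0 then loopA arr (i+2) (postes + 1)
    else loopA arr (i+1) postes
  else postes
termination_by arr.length - i

def calcular_postes (cerca : List (String × List Int)) : Int :=
  match lookupPostes cerca with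
  | none => 0      -- Python raises KeyError here; excluded by Pre_
  | some arr => loopA arr 0 0

-- ===== PORT B =====
def stepB (acc : Int × Int) (x : Int) : Int × Int :=
  if x = 0 then (acc.1, acc.2 + 1) else (acc.1 + PySem.Int.floordiv acc.2 2, 0)

def calcular_postes_alt (cerca : List (String × List Int)) : Int :=
  match lookupPostes cerca with
  | none => 0      -- Python raises KeyError here; excluded by Pre_
  | some arr =>
    let acc := arr.foldl stepB (0, 0)
    acc.1 + PySem.Int.floordiv acc.2 2

-- ===== PRECONDITION & SPEC =====
-- Pre_ excludes exactly the inputs whose dict lacks the key "array_postes", where Python raises KeyError.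
def Pre_calcular_postes (cerca : List (String × List Int)) : Prop :=
  "array_postes" ∈ cerca.map Prod.fst

instance (cerca : List (String × List Int)) : Decidable (Pre_calcular_postes cerca) := by
  unfold Pre_calcular_postes; infer_instance

def pvWitness_calcular_postes : (List (String × List Int)) := [("array_postes", [0, 0, 1, 0])]

def Spec_calcular_postes (cerca : List (String × List Int)) (out : Int) : Prop := out = calcular_postes_alt cerca
instance (cerca : List (String × List Int)) (out : Int) : Decidable (Spec_calcular_postes cerca out) := by unfold Spec_calcular_postes; infer_instance

-- ===== CLAIM (what is proved, stated in full; the proofs are below) =====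
def Claim_equal_calcular_postes : Prop := ∀ (cerca : List (String × List Int)), Dom_calcular_postes cerca → Pre_calcular_postes cerca → Spec_calcular_postes cerca (calcular_postes cerca)

-- ===== LEMMAS AND PROOFS =====

-- canonical pair count: greedy non-overlapping consecutive zero pairs
def pairs : List Int → Int
  | 0 :: 0 :: t => 1 + pairs t
  | _ :: t => pairs t
  | [] => 0

theorem pairs_short (l : List Int) (h : l.length ≤ 1) : pairs l = 0 := by
  match l, h with
  | [], _ => rfl
  | [x], _ => by_cases hx : x = 0 <;> simp [pairs, hx]

theorem pairs_cons_ne (x : Int) (t : List Int) (hx : x ≠ 0) : pairs (x :: t) = pairs t := by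
  cases t with
  | nil => by_cases hx' : x = 0 <;> simp [pairs, hx']
  | cons y t' => simp [pairs, hx]

theorem pairs_zero_cons_ne (x : Int) (t : List Int) (hx : x ≠ 0) :
    pairs (0 :: x :: t) = pairs (x :: t) := by
  simp [pairs, hx]

-- A's loop counts the pairs of the suffix from i
theorem loopA_eq_pairs (arr : List Int) (i : Nat) (p : Int) :
    loopA arr i p = p + pairs (arr.drop i) := by
  rw [loopA]
  split
  · rename_i h
    have hi : i < arr.length := by omega
    have hdrop : arr.drop i = arr[i] :: arr[i+1] :: arr.drop (i+2) := by
      rw [List.drop_eq_getElem_cons hi, List.drop_eq_getElem_cons h]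
    have g1 : arr[i]! = arr[i] := getElem!_pos arr i hi
    have g2 : arr[i+1]! = arr[i+1] := getElem!_pos arr (i+1) h
    have hd1 : arr.drop i = arr[i] :: arr.drop (i+1) := List.drop_eq_getElem_cons hi
    have hd2 : arr.drop (i+1) = arr[i+1] :: arr.drop (i+2) := List.drop_eq_getElem_cons h
    split
    · rename_i hz
      rw [loopA_eq_pairs arr (i+2) (p+1), hdrop]
      rw [g1, g2] at hz
      rw [hz.1, hz.2]
      rw [show pairs (0 :: 0 :: arr.drop (i+2)) = 1 + pairs (arr.drop (i+2)) from by simp [pairs]]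
      ring
    · rename_i hz
      rw [loopA_eq_pairs arr (i+1) p]
      rw [g1, g2] at hz
      by_cases h1 : arr[i] = 0
      · have h2 : arr[i+1] ≠ 0 := fun c => hz ⟨h1, c⟩
        rw [hd1, hd2, h1, pairs_zero_cons_ne _ _ h2]
      · rw [hd1, pairs_cons_ne _ _ h1]
  · rename_i h
    rw [pairs_short _ (by rw [List.length_drop]; omega)]
    ring
termination_by arr.length - i

-- flush semantics of B's fold
def flushg (run : Int) : List Int → Int
  | [] => PySem.Int.floordiv run 2
  | x :: t => if x = 0 then flushg (run + 1) t else PySem.Int.floordiv run 2 + flushg 0 t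

theorem fold_flushg (t : List Int) : ∀ (total run : Int),
    ((t.foldl stepB (total, run)).1 + PySem.Int.floordiv (t.foldl stepB (total, run)).2 2)
      = total + flushg run t := by
  induction t with
  | nil => intro total run; simp [flushg]
  | cons x t ih =>
    intro total run
    by_cases hx : x = 0
    · rw [List.foldl_cons,
        show stepB (total, run) x = (total, run + 1) from by simp [stepB, hx],
        ih total (run + 1),
        show flushg run (x :: t) = flushg (run + 1) t from by simp [flushg, hx]]
    · rw [List.foldl_cons,
        show stepB (total, run) x = (total + PySem.Int.floordiv run 2, 0) from by simp [stepB, hx],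
        ih _ 0,
        show flushg run (x :: t) = PySem.Int.floordiv run 2 + flushg 0 t from by simp [flushg, hx]]
      ring

theorem pairs_rep_app : (n : Nat) → (t : List Int) →
    (t = [] ∨ ∃ x t', t = x :: t' ∧ x ≠ 0) →
    pairs (List.replicate n 0 ++ t) = ((n / 2 : Nat) : Int) + pairs t
  | 0, t, _ => by simp
  | 1, t, h => by
    rcases h with h | ⟨x, t', rfl, hx⟩
    · subst h; simp [pairs]
    · simp [List.replicate, pairs, hx, pairs_cons_ne _ _ hx]
  | (n+2), t, h => by
    have : List.replicate (n+2) (0 : Int) ++ t = 0 :: 0 :: (List.replicate n 0 ++ t) := by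
      simp [List.replicate]
    rw [this,
      show pairs (0 :: 0 :: (List.replicate n 0 ++ t)) = 1 + pairs (List.replicate n 0 ++ t) from by
        simp [pairs],
      pairs_rep_app n t h,
      show ((n + 2) / 2 : Nat) = (n / 2 : Nat) + 1 from by omega]
    push_cast
    ring

theorem flushg_eq_pairs (t : List Int) : ∀ (n : Nat),
    flushg (n : Int) t = pairs (List.replicate n 0 ++ t) := by
  induction t with
  | nil =>
    intro n
    have h := pairs_rep_app n [] (Or.inl rfl)
    simp [pairs] at h
    simp [flushg, h]
  | cons x t ih =>
    intro n
    by_cases hx : x = 0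
    · subst hx
      have : flushg ((n : Int)) (0 :: t) = flushg ((n : Int) + 1) t := by simp [flushg]
      rw [this]
      have hcast : ((n : Int) + 1) = ((n + 1 : Nat) : Int) := by push_cast; ring
      rw [hcast, ih (n + 1)]
      congr 1
      rw [List.replicate_succ' (n := n)]
      simp
    · have : flushg ((n : Int)) (x :: t) = PySem.Int.floordiv (n : Int) 2 + flushg 0 t := by
        simp [flushg, hx]
      rw [this]
      have h0 : flushg (0 : Int) t = pairs t := by
        have := ih 0; simpa using this
      rw [h0, pairs_rep_app n (x :: t) (Or.inr ⟨x, t, rfl, hx⟩), pairs_cons_ne _ _ hx]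
      simp

theorem alt_eq_pairs (arr : List Int) :
    ((arr.foldl stepB (0, 0)).1 + PySem.Int.floordiv (arr.foldl stepB (0, 0)).2 2) = pairs arr := by
  rw [fold_flushg arr 0 0]
  have := flushg_eq_pairs arr 0
  simpa using this

-- ===== VERDICT (by name: the statement is the Claim_ definition above) =====
theorem calcular_postes_spec : Claim_equal_calcular_postes := by
  intro cerca _hdom _hpre
  unfold Spec_calcular_postes calcular_postes calcular_postes_alt
  cases h : lookupPostes cerca with
  | none => rfl
  | some arr =>
    show loopA arr 0 0 =
      (arr.foldl stepB (0, 0)).1 + PySem.Int.floordiv (arr.foldl stepB (0, 0)).2 2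
    rw [loopA_eq_pairs arr 0 0, alt_eq_pairs arr]
    simp
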